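-- pv_equiv track=rewrite | github.com/nv259/CodeDaily | 1227-number-of-equivalent-domino-pairs/1227-number-of-equivalent-domino-pairs.py | C2_
-- ===== SOURCE A (Python) =====
-- def C2_(n):
--     if n == 2:
--         return 1
--
--     prod = 1
--     for i in range(1, n + 1):
--         prod *= i
--         if i == n - 2:
--             nk_fact = prod
--         elif i == n:
--             n_fact = prod
--
--     return n_fact // (nk_fact * 2)
-- ===== SOURCE B (Python) =====
-- def C2_(n):
--     return n * (n - 1) // 2
-- ===== Notes on version B (the rewrite author's own statement) =====
-- stated objective: faster
-- what changed: Replaces the O(n) factorial loop (n!/((n-2)!*2)) with the closed form n*(n-1)//2; for n <= 1, where A raises UnboundLocalError, B returns the formula's value.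
-- outside the precondition, e.g. on C2_(1): A raises UnboundLocalError, B returns 0; on C2_(0): A raises UnboundLocalError, B returns 0
import Mathlib
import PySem

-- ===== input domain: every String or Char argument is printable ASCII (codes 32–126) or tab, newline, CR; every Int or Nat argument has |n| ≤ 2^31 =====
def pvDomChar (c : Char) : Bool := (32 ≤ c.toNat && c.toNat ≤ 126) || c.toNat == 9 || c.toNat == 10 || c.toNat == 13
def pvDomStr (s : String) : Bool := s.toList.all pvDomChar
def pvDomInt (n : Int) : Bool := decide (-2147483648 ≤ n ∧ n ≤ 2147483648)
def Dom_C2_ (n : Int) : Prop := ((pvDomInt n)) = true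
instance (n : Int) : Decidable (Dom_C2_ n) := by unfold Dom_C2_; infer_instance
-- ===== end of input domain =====

-- B replaces A's factorial loop computing n!/((n-2)!*2) by the closed form n*(n-1)//2 (O(1)).

-- ===== PORT A =====
-- loop body: prod *= i; if i == n-2: nk_fact = prod; elif i == n: n_fact = prod
def C2step (n : Int) (st : Int × Option Int × Option Int) (i : Int) : Int × Option Int × Option Int :=
  let prod := st.1 * i
  if i = n - 2 then (prod, some prod, st.2.2)
  else if i = n then (prod, st.2.1, some prod)
  else (prod, st.2.1, st.2.2)

def C2_ (n : Int) : Int :=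
  if n = 2 then 1
  else
    let st := (PySem.List.pyRange 1 (n + 1) 1).foldl (C2step n) (1, none, none)
    match st.2.2, st.2.1 with
    | some nFact, some nkFact => PySem.Int.floordiv nFact (nkFact * 2)
    | _, _ => 0  -- Python raises UnboundLocalError here; excluded by Pre_C2_

-- ===== PORT B =====
def C2__alt (n : Int) : Int := PySem.Int.floordiv (n * (n - 1)) 2

-- ===== PRECONDITION & SPEC =====
-- Pre_ excludes n ≤ 1, where A raises UnboundLocalError (the loop never assigns both variables).
def Pre_C2_ (n : Int) : Prop := 2 ≤ n
instance (n : Int) : Decidable (Pre_C2_ n) := by unfold Pre_C2_; infer_instance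
def pvWitness_C2_ : Int := 5

def Spec_C2_ (n : Int) (out : Int) : Prop := out = C2__alt n
instance (n : Int) (out : Int) : Decidable (Spec_C2_ n out) := by unfold Spec_C2_; infer_instance

-- ===== CLAIM (what is proved, stated in full; the proofs are below) =====
def Claim_equal_C2_ : Prop := ∀ (n : Int), Dom_C2_ n → Pre_C2_ n → Spec_C2_ n (C2_ n)

-- ===== LEMMAS AND PROOFS =====

-- factorial of an Int (via toNat), the value A's `prod` accumulates
def pvFact (m : Int) : Int := (Nat.factorial m.toNat : Int)

lemma pvFact_succ (k : ℕ) : pvFact ((k : Int) + 1) = pvFact k * ((k : Int) + 1) := by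
  simp only [pvFact]
  have h1 : ((k : Int) + 1).toNat = k + 1 := by omega
  have h2 : ((k : Int)).toNat = k := by omega
  rw [h1, h2, Nat.factorial_succ]
  push_cast; ring

lemma pvFact_pos (m : Int) : 0 < pvFact m := by
  simp [pvFact]; exact Nat.factorial_pos _

-- loop invariant: after processing i = 1..k (k ≤ n), prod = k!, and the two
-- option slots hold (n-2)! resp. k! exactly once i has passed n-2 resp. n
lemma C2_loop_inv (n : Int) (hn : 3 ≤ n) (k : ℕ) (hk : (k : Int) ≤ n) :
    (PySem.List.pyRange 1 ((k : Int) + 1) 1).foldl (C2step n) (1, none, none) =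
      (pvFact k,
       (if (k : Int) < n - 2 then none else some (pvFact (n - 2))),
       (if (k : Int) < n then none else some (pvFact k))) := by
  induction k with
  | zero =>
      rw [PySem.List.pyRange_one_eq_nil (by norm_num)]
      simp only [List.foldl_nil]
      rw [if_pos (by omega), if_pos (by omega)]
      simp [pvFact]
  | succ k ih =>
      have hk' : (k : Int) ≤ n := by push_cast at hk ⊢; omega
      have hsplit : PySem.List.pyRange 1 ((k : Int) + 1 + 1) 1 =
          PySem.List.pyRange 1 ((k : Int) + 1) 1 ++ [(k : Int) + 1] := by
        exact PySem.List.pyRange_one_succ_right (by omega)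
      push_cast at hk ⊢
      rw [hsplit, List.foldl_append, List.foldl_cons, List.foldl_nil, ih hk']
      simp only [C2step]
      rcases lt_trichotomy ((k : Int) + 1) (n - 2) with h | h | h
      · simp only [if_neg (show ¬((k : Int) + 1 = n - 2) by omega),
          if_neg (show ¬((k : Int) + 1 = n) by omega),
          if_pos (show (k : Int) < n - 2 by omega), if_pos (show (k : Int) < n by omega),
          if_pos (show (k : Int) + 1 < n - 2 by omega),
          if_pos (show (k : Int) + 1 < n by omega), pvFact_succ]
      · rw [← h]
        simp only [if_pos (show (k : Int) < (k : Int) + 1 by omega),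
          if_pos (show (k : Int) < n by omega),
          if_neg (show ¬((k : Int) + 1 < (k : Int) + 1) by omega),
          if_pos (show (k : Int) + 1 < n by omega), pvFact_succ, if_true]
      · rcases lt_trichotomy ((k : Int) + 1) n with h2 | h2 | h2
        · simp only [if_neg (show ¬((k : Int) + 1 = n - 2) by omega),
            if_neg (show ¬((k : Int) + 1 = n) by omega),
            if_neg (show ¬((k : Int) < n - 2) by omega),
            if_pos (show (k : Int) < n by omega),
            if_neg (show ¬((k : Int) + 1 < n - 2) by omega),
            if_pos (show (k : Int) + 1 < n by omega), pvFact_succ]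
        · rw [← h2]
          simp only [if_neg (show ¬((k : Int) + 1 = (k : Int) + 1 - 2) by omega),
            if_neg (show ¬((k : Int) < (k : Int) + 1 - 2) by omega),
            if_pos (show (k : Int) < (k : Int) + 1 by omega),
            if_neg (show ¬((k : Int) + 1 < (k : Int) + 1 - 2) by omega),
            if_neg (show ¬((k : Int) + 1 < (k : Int) + 1) by omega), pvFact_succ, if_true]
        · omega

-- n! = (n-2)! * (n * (n-1)) for n ≥ 3
lemma pvFact_step2 (n : Int) (hn : 3 ≤ n) :
    pvFact n = pvFact (n - 2) * (n * (n - 1)) := by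
  obtain ⟨m, hm⟩ : ∃ m : ℕ, n = (m : Int) + 2 ∧ 1 ≤ m := by
    refine ⟨(n - 2).toNat, by omega, by omega⟩
  obtain ⟨hm1, hm2⟩ := hm
  subst hm1
  simp only [pvFact]
  have h1 : ((m : Int) + 2).toNat = m + 2 := by omega
  have h2 : ((m : Int) + 2 - 2).toNat = m := by omega
  rw [h1, h2, Nat.factorial_succ, Nat.factorial_succ]
  push_cast; ring

lemma C2_pos_eq (n : Int) (hn : 3 ≤ n) : C2_ n = C2__alt n := by
  have hkey := C2_loop_inv n hn n.toNat (by omega)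
  have hnn : ((n.toNat : Int)) = n := by omega
  rw [hnn] at hkey
  obtain ⟨v, hv⟩ : ∃ v : Int, n * (n - 1) = 2 * v := by
    obtain ⟨w, hw⟩ := Int.even_mul_succ_self (n - 1)
    exact ⟨w, by rw [show n * (n - 1) = (n - 1) * (n - 1 + 1) by ring, hw]; ring⟩
  have hfpos := pvFact_pos (n - 2)
  simp only [C2_, if_neg (show ¬(n = 2) by omega), hkey,
    if_neg (show ¬(n < n - 2) by omega), if_neg (show ¬(n < n) by omega)]
  rw [C2__alt, pvFact_step2 n hn, hv]
  rw [PySem.Int.floordiv_eq_ediv_of_pos (show (0:Int) < pvFact (n - 2) * 2 by positivity),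
      PySem.Int.floordiv_eq_ediv_of_pos (show (0:Int) < 2 by norm_num)]
  have h : pvFact (n - 2) * (2 * v) = (pvFact (n - 2) * 2) * v := by ring
  rw [h, Int.mul_ediv_cancel_left _ (by positivity), Int.mul_ediv_cancel_left _ (by norm_num)]

-- ===== VERDICT (by name: the statement is the Claim_ definition above) =====
theorem C2__spec : Claim_equal_C2_ := by
  intro n _ hpre
  unfold Spec_C2_
  rcases eq_or_lt_of_le (hpre : (2 : Int) ≤ n) with h | h
  · rw [C2_, if_pos h.symm, C2__alt, ← h]
    decide
  · exact C2_pos_eq n (by omega)
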